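-- pv_equiv track=rewrite | github.com/JAGAN62/python-29r | Day11/functions.py | half_list
-- ===== SOURCE A (Python) =====
-- def half_list(newlist):
--     low = len(newlist)//2    #0
--     high = len(newlist)-1   #len(newlist)//2-1
--     while low < high:
--         newlist[low],newlist[high] = newlist[high],newlist[low]
--         low+=1
--         high-=1
--     return newlist
-- ===== SOURCE B (Python) =====
-- def half_list(newlist):
--     low = len(newlist) // 2
--     newlist[low:] = newlist[low:][::-1]   # slice assignment: mutates newlist in place, same as A
--     return newlist
-- ===== Notes on version B (the rewrite author's own statement) =====
-- stated objective: simpler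
-- what changed: Replaces the two-pointer while-loop swapping pairs in place with a single slice assignment that rebinds the second half to its reversed copy.
import Mathlib
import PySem

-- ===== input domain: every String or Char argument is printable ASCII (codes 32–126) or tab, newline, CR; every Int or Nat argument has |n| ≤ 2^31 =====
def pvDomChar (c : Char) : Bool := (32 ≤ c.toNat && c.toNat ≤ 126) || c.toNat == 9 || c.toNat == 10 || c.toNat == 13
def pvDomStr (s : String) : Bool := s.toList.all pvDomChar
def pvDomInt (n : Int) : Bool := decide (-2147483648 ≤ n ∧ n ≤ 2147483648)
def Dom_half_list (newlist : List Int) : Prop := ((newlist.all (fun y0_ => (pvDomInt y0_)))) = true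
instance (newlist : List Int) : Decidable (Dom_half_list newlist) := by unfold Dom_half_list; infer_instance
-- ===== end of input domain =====

-- B changes A's two-pointer pair-swapping while-loop into a single slice reversal of the
-- second half (objective: simpler). A mutates its argument in place; the equivalence proved
-- here is about the return value only.

-- ===== PORT A =====
-- the while-loop: swap newlist[low], newlist[high]; low+=1; high-=1 while low < high.
-- All indexing in A is with provably in-range nonnegative indices (low starts at len//2 ≥ 0
-- and only increases; the swap runs only when low < high ≤ len-1), so getD/set with .toNat
-- is exact here.
def halfLoop (xs : List Int) (low high : Int) : List Int :=
  if low < high then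
    let xl := xs.getD low.toNat 0
    let xh := xs.getD high.toNat 0
    halfLoop ((xs.set low.toNat xh).set high.toNat xl) (low + 1) (high - 1)
  else xs
termination_by (high - low).toNat
decreasing_by omega

def half_list (newlist : List Int) : List Int :=
  halfLoop newlist (PySem.Int.floordiv (newlist.length : Int) 2) ((newlist.length : Int) - 1)

-- ===== PORT B =====
-- newlist[low:] = newlist[low:][::-1]; the slice newlist[low:] with 0 ≤ low is drop low,
-- [::-1] is reverse, and the slice assignment keeps the first low elements.
def half_list_alt (newlist : List Int) : List Int :=
  let low := (PySem.Int.floordiv (newlist.length : Int) 2).toNat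
  newlist.take low ++ (newlist.drop low).reverse

-- ===== PRECONDITION & SPEC =====
def Spec_half_list (newlist : List Int) (out : List Int) : Prop := out = half_list_alt newlist
instance (newlist : List Int) (out : List Int) : Decidable (Spec_half_list newlist out) := by unfold Spec_half_list; infer_instance

-- ===== CLAIM (what is proved, stated in full; the proofs are below) =====
def Claim_equal_half_list : Prop := ∀ (newlist : List Int), Dom_half_list newlist → Spec_half_list newlist (half_list newlist)

-- ===== LEMMAS AND PROOFS =====

theorem halfLoop_length (xs : List Int) (low high : Int) :
    (halfLoop xs low high).length = xs.length := by
  rw [halfLoop]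
  split
  · rw [halfLoop_length]
    simp
  · rfl
termination_by (high - low).toNat
decreasing_by omega

-- pointwise characterisation of the swap loop: it reverses the segment [low, high]
theorem halfLoop_getD (xs : List Int) (low high : Int) (h0 : 0 ≤ low)
    (hh : high < (xs.length : Int)) (i : Nat) :
    (halfLoop xs low high).getD i 0 =
      if low ≤ (i : Int) ∧ (i : Int) ≤ high then xs.getD (low + high - i).toNat 0
      else xs.getD i 0 := by
  rw [halfLoop]
  split
  · rename_i hlt
    set xs' := (xs.set low.toNat (xs.getD high.toNat 0)).set high.toNat (xs.getD low.toNat 0) with hxs'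
    have hlen' : xs'.length = xs.length := by simp [hxs']
    have hH : high.toNat < xs.length := by omega
    have hL : low.toNat < xs.length := by omega
    have hne : high.toNat ≠ low.toNat := by omega
    have hget' : ∀ j : Nat, xs'.getD j 0 =
        if j = high.toNat then xs.getD low.toNat 0
        else if j = low.toNat then xs.getD high.toNat 0
        else xs.getD j 0 := by
      intro j
      by_cases hjlen : j < xs.length
      · simp only [hxs', List.getD, List.getElem?_set, List.length_set]
        by_cases h1 : j = high.toNat
        · simp [h1, hH]
        · by_cases h2 : j = low.toNat
          · simp [h2, hne, Ne.symm hne, hL]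
          · have t1 : high.toNat ≠ j := fun h => h1 h.symm
            have t2 : low.toNat ≠ j := fun h => h2 h.symm
            simp [t1, t2, h1, h2]
      · have hbig : xs.length ≤ j := Nat.le_of_not_lt hjlen
        have hne1 : j ≠ high.toNat := by omega
        have hne2 : j ≠ low.toNat := by omega
        simp [hne1, hne2, List.getD_eq_getElem?_getD, List.getElem?_eq_none (by omega : xs'.length ≤ j),
          List.getElem?_eq_none hbig]
    rw [halfLoop_getD xs' (low + 1) (high - 1) (by omega) (by rw [hlen']; omega)]
    by_cases hc : low + 1 ≤ (i : Int) ∧ (i : Int) ≤ high - 1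
    · -- strictly inside: the two sets do not touch index low+high-i
      have hcond : low ≤ (i : Int) ∧ (i : Int) ≤ high := by omega
      have e1 : (low + 1 + (high - 1) - i) = low + high - i := by ring
      rw [if_pos hc, if_pos hcond, e1, hget']
      have n1 : (low + high - i).toNat ≠ high.toNat := by omega
      have n2 : (low + high - i).toNat ≠ low.toNat := by omega
      rw [if_neg n1, if_neg n2]
    · rw [if_neg hc]
      by_cases hcond : low ≤ (i : Int) ∧ (i : Int) ≤ high
      · -- i is one of the endpoints: i = low or i = high
        rw [if_pos hcond, hget']
        rcases (by omega : (i : Int) = low ∨ (i : Int) = high) with he | he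
        · have h1 : i = low.toNat := by omega
          have h2 : i ≠ high.toNat := by omega
          have h3 : (low + high - i).toNat = high.toNat := by omega
          rw [if_neg h2, if_pos h1, h3]
        · have h1 : i = high.toNat := by omega
          have h3 : (low + high - i).toNat = low.toNat := by omega
          rw [if_pos h1, h3]
      · -- outside the segment: untouched
        rw [if_neg hcond, hget']
        have n1 : i ≠ high.toNat := by omega
        have n2 : i ≠ low.toNat := by omega
        rw [if_neg n1, if_neg n2]
  · rename_i hge
    by_cases hcond : low ≤ (i : Int) ∧ (i : Int) ≤ high
    · have he : (low + high - i).toNat = i := by omega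
      rw [if_pos hcond, he]
    · rw [if_neg hcond]
termination_by (high - low).toNat
decreasing_by omega

theorem alt_getD (xs : List Int) (i : Nat) :
    (half_list_alt xs).getD i 0 =
      if (xs.length : Int) / 2 ≤ (i : Int) ∧ (i : Int) ≤ (xs.length : Int) - 1 then
        xs.getD ((xs.length : Int) / 2 + ((xs.length : Int) - 1) - i).toNat 0
      else xs.getD i 0 := by
  simp only [half_list_alt]
  have hfd : PySem.Int.floordiv (xs.length : Int) 2 = (xs.length : Int) / 2 :=
    PySem.Int.floordiv_eq_ediv_of_pos (by omega)
  rw [hfd]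
  have hdiv : ((xs.length : Int) / 2).toNat = xs.length / 2 := by omega
  rw [hdiv]
  set n := xs.length with hn
  set lo := n / 2 with hlo
  have hlo_le : lo ≤ n := Nat.div_le_self _ _
  by_cases hi : i < n
  · have hgetL : ∀ j : Nat, j < n → (xs.take lo ++ (xs.drop lo).reverse).getD j 0 =
        if j < lo then xs.getD j 0 else xs.getD (lo + (n - 1) - j) 0 := by
      intro j hj
      by_cases hjlo : j < lo
      · rw [if_pos hjlo, List.getD_eq_getElem _ _ (by simp; omega),
          List.getD_eq_getElem _ _ (by omega)]
        rw [List.getElem_append_left (by simp; omega)]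
        simp
      · rw [if_neg hjlo, List.getD_eq_getElem _ _ (by simp; omega),
          List.getD_eq_getElem _ _ (by omega)]
        have hjlo' : lo ≤ j := Nat.le_of_not_lt hjlo
        have hlt : (xs.take lo).length ≤ j := by simp; omega
        rw [List.getElem_append_right hlt]
        have : (xs.take lo).length = lo := by simp; omega
        simp only [this]
        rw [List.getElem_reverse]
        rw [List.getElem_drop]
        congr 1
        simp; omega
    rw [hgetL i hi]
    by_cases hc : lo ≤ i
    · have hcond : (n : Int) / 2 ≤ (i : Int) ∧ (i : Int) ≤ (n : Int) - 1 := by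
        constructor
        · have : ((n : Int) / 2) = (lo : Int) := by omega
          omega
        · omega
      rw [if_pos hcond, if_neg (by omega)]
      congr 1
      have : ((n : Int) / 2) = (lo : Int) := by omega
      omega
    · rw [if_pos (by omega)]
      rw [if_neg (by
        intro hcond
        have : ((n : Int) / 2) = (lo : Int) := by omega
        omega)]
  · -- i ≥ length: both sides default to 0
    have h1 : (xs.take lo ++ (xs.drop lo).reverse).length = n := by simp; omega
    rw [List.getD_eq_getElem?_getD, List.getElem?_eq_none (by omega)]
    rw [if_neg (by omega)]
    rw [List.getD_eq_getElem?_getD, List.getElem?_eq_none (by omega)]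
theorem getD_ext (xs ys : List Int) (hlen : xs.length = ys.length)
    (h : ∀ i : Nat, xs.getD i 0 = ys.getD i 0) : xs = ys := by
  apply List.ext_getElem hlen
  intro i h1 h2
  have := h i
  rwa [List.getD_eq_getElem _ _ h1, List.getD_eq_getElem _ _ h2] at this

-- ===== VERDICT (by name: the statement is the Claim_ definition above) =====
theorem half_list_spec : Claim_equal_half_list := by
  intro xs _
  show half_list xs = half_list_alt xs
  apply getD_ext
  · unfold half_list half_list_alt
    rw [halfLoop_length]
    simp
    omega
  · intro i
    unfold half_list
    have hfd : PySem.Int.floordiv (xs.length : Int) 2 = (xs.length : Int) / 2 :=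
      PySem.Int.floordiv_eq_ediv_of_pos (by omega)
    rw [hfd, halfLoop_getD xs _ _ (by omega) (by omega) i, alt_getD]
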